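-- pv_equiv track=rewrite | github.com/BenHND/Janus-Agent | janus/runtime/core/tool_spec_generator.py | get_compact_tools_for_prompt
-- ===== SOURCE A (Python) =====
-- from typing import Any, Dict, List, Optional
--
-- def get_compact_tools_for_prompt(
--     tools: List[Dict[str, str]],
--     language: str = "en",
--     max_tools: Optional[int] = None
-- ) -> str:
--     """
--     Format tools in a compact way for LLM prompts.
--
--     This replaces the hardcoded schemas in prompt templates with
--     dynamically generated content from the actual tool catalog.
--
--     Args:
--         tools: List of tool specifications
--         language: Language for formatting ("en" or "fr")
--         max_tools: Optional limit on number of tools to include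
--
--     Returns:
--         Formatted string for inclusion in LLM prompt
--     """
--     if max_tools:
--         tools = tools[:max_tools]
--
--     if language == "fr":
--         prompt = "**OUTILS DISPONIBLES:**\n\n"
--     else:
--         prompt = "**AVAILABLE TOOLS:**\n\n"
--
--     # Group tools by module/agent
--     tools_by_module = {}
--     for tool in tools:
--         # Extract module from id (e.g., "crm_search_contact" -> "crm")
--         tool_id = tool.get("id", "")
--         parts = tool_id.split("_", 1)
--         if len(parts) == 2:
--             module = parts[0]
--         else:
--             module = "other"
--
--         if module not in tools_by_module:
--             tools_by_module[module] = []
--         tools_by_module[module].append(tool)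
--
--     # Format each module's tools
--     for module, module_tools in sorted(tools_by_module.items()):
--         prompt += f"**{module.upper()}:**\n"
--         for tool in module_tools:
--             signature = tool.get("signature", "")
--             description = tool.get("description", "")
--             prompt += f"  - `{signature}`: {description}\n"
--         prompt += "\n"
--
--     return prompt
-- ===== SOURCE B (Python) =====
-- def get_compact_tools_for_prompt(tools, language="en", max_tools=None):
--     if max_tools:
--         tools = tools[:max_tools]
--
--     def module_of(tool):
--         parts = tool.get("id", "").split("_", 1)
--         return parts[0] if len(parts) == 2 else "other"
--
--     header = "**OUTILS DISPONIBLES:**\n\n" if language == "fr" else "**AVAILABLE TOOLS:**\n\n"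
--
--     sections = []
--     for m in sorted({module_of(t) for t in tools}):
--         lines = [
--             f"  - `{t.get('signature', '')}`: {t.get('description', '')}"
--             for t in tools
--             if module_of(t) == m
--         ]
--         sections.append("**" + m.upper() + ":**\n" + "\n".join(lines) + "\n\n")
--
--     return header + "".join(sections)
-- ===== Notes on version B (the rewrite author's own statement) =====
-- stated objective: simpler
-- what changed: Replaces A's dict-of-lists bucketing followed by sorted(items) with sorting the distinct module names once and emitting each section by a direct filter over the tool list, building the string with join instead of repeated +=.
import Mathlib
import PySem

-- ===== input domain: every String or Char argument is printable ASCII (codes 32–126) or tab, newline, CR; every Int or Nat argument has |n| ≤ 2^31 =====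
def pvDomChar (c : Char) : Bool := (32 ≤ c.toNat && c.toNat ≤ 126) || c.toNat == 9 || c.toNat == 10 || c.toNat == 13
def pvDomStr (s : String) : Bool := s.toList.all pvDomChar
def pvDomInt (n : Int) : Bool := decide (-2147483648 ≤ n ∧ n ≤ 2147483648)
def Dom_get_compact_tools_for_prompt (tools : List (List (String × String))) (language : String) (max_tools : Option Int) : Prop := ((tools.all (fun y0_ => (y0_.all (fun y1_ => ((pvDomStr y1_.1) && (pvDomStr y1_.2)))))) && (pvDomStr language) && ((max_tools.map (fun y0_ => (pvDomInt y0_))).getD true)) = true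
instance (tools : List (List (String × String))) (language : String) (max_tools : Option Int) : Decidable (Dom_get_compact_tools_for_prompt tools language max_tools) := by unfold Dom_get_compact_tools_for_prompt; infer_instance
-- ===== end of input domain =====

-- B is simpler: instead of bucketing tools into a dict of lists and then walking the
-- sorted items, it sorts the distinct module names once and emits each section by a
-- direct filter over the tool list (objective: simpler; same observable result).

-- ===== PORT A =====
-- shared helper: module name extracted from a tool's "id" (parts = id.split("_", 1))
def pvModuleOf (tool : List (String × String)) : String :=
  let tool_id := (PySem.Dict.mk tool).getD "id" ""
  let parts := (PySem.Str.splitMax? tool_id "_" 1).getD []   -- sep "_" ≠ "": never none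
  if parts.length = 2 then PySem.List.pyGetD parts 0 "" else "other"

-- 'if max_tools:' — slice only when max_tools is neither None nor 0
def pvSliced (tools : List (List (String × String))) (max_tools : Option Int) : List (List (String × String)) :=
  match max_tools with
  | some m => if m = 0 then tools else PySem.List.slice tools none (some m)
  | none => tools

def get_compact_tools_for_prompt (tools : List (List (String × String))) (language : String) (max_tools : Option Int) : String :=
  let tools := pvSliced tools max_tools
  let prompt := if language = "fr" then "**OUTILS DISPONIBLES:**\n\n" else "**AVAILABLE TOOLS:**\n\n"
  let tools_by_module : PySem.Dict String (List (List (String × String))) :=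
    tools.foldl (fun d tool =>
      let module := pvModuleOf tool
      let d := if d.contains module then d else d.insert module []
      d.modify module [] (fun l => l ++ [tool])) PySem.Dict.empty
  -- sorted(tools_by_module.items()): keyed on the first component — exact, because dict
  -- keys are distinct so Python's tuple comparison never reads the second component
  let sortedItems := PySem.List.sorted tools_by_module.items (fun p => p.1) false
  sortedItems.foldl (fun prompt mp =>
    let prompt := prompt ++ "**" ++ PySem.Str.upper mp.1 ++ ":**\n"
    let prompt := mp.2.foldl (fun prompt tool =>
      prompt ++ "  - `" ++ (PySem.Dict.mk tool).getD "signature" "" ++ "`: " ++ (PySem.Dict.mk tool).getD "description" "" ++ "\n") prompt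
    prompt ++ "\n") prompt

-- ===== PORT B =====
def pvLine (tool : List (String × String)) : String :=
  "  - `" ++ (PySem.Dict.mk tool).getD "signature" "" ++ "`: " ++ (PySem.Dict.mk tool).getD "description" ""

def get_compact_tools_for_prompt_alt (tools : List (List (String × String))) (language : String) (max_tools : Option Int) : String :=
  let tools := pvSliced tools max_tools
  let header := if language = "fr" then "**OUTILS DISPONIBLES:**\n\n" else "**AVAILABLE TOOLS:**\n\n"
  let sections := (PySem.List.sorted (PySem.Set.ofList (tools.map pvModuleOf)) (fun m => m) false).map
    (fun m =>
      let lines := (tools.filter (fun t => pvModuleOf t == m)).map pvLine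
      "**" ++ PySem.Str.upper m ++ ":**\n" ++ PySem.Str.join "\n" lines ++ "\n\n")
  header ++ PySem.Str.join "" sections

-- ===== PRECONDITION & SPEC =====
def Spec_get_compact_tools_for_prompt (tools : List (List (String × String))) (language : String) (max_tools : Option Int) (out : String) : Prop := out = get_compact_tools_for_prompt_alt tools language max_tools
instance (tools : List (List (String × String))) (language : String) (max_tools : Option Int) (out : String) : Decidable (Spec_get_compact_tools_for_prompt tools language max_tools out) := by unfold Spec_get_compact_tools_for_prompt; infer_instance

-- ===== CLAIM (what is proved, stated in full; the proofs are below) =====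
def Claim_equal_get_compact_tools_for_prompt : Prop := ∀ (tools : List (List (String × String))) (language : String) (max_tools : Option Int), Dom_get_compact_tools_for_prompt tools language max_tools → Spec_get_compact_tools_for_prompt tools language max_tools (get_compact_tools_for_prompt tools language max_tools)

-- ===== LEMMAS AND PROOFS =====

-- A's "ensure key then append" step is one dict modify
theorem pvStep_merge (d : PySem.Dict String (List (List (String × String)))) (m : String) (t : List (String × String)) :
    ((if d.contains m then d else d.insert m ([] : List (List (String × String)))).modify m [] (fun l => l ++ [t])) = d.modify m [] (fun l => l ++ [t]) := by
  by_cases h : d.contains m = true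
  · simp [h]
  · have h' : d.contains m = false := by simpa using h
    rw [if_neg (by simp [h'])]
    simp only [PySem.Dict.modify, PySem.Dict.getD_insert_self, PySem.Dict.insert_insert_self]
    simp [PySem.Dict.getD_of_not_contains, h']

-- the bucket a key ends with is the filter of the tool list by that key
theorem pvGetD_build (ts : List (List (String × String))) (c : String) :
    ((ts.foldl (fun d t => d.modify (pvModuleOf t) [] (fun l => l ++ [t])) PySem.Dict.empty).getD c []) = ts.filter (fun t => pvModuleOf t == c) := by
  have hmap : ts.foldl (fun d t => d.modify (pvModuleOf t) [] (fun l => l ++ [t])) PySem.Dict.empty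
      = (ts.map (fun t => (pvModuleOf t, t))).foldl (fun d p => d.modify p.1 [] (fun l => l ++ [p.2])) PySem.Dict.empty := by
    rw [List.foldl_map]
  rw [hmap, PySem.Dict.getD_foldl_modify_append, PySem.Dict.getD_empty]
  rw [List.filter_map]
  simp [List.map_map, Function.comp_def]

theorem pvItems_build (ts : List (List (String × String))) :
    ((ts.foldl (fun d t => d.modify (pvModuleOf t) [] (fun l => l ++ [t])) PySem.Dict.empty).items) = (PySem.Set.ofList (ts.map pvModuleOf)).map (fun m => (m, ts.filter (fun t => pvModuleOf t == m))) := by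
  have hkeys : (ts.foldl (fun d t => d.modify (pvModuleOf t) [] (fun l => l ++ [t])) PySem.Dict.empty).keys
      = PySem.Set.ofList (ts.map pvModuleOf) := by
    rw [PySem.Dict.keys_foldl_modify_key ts pvModuleOf [] (fun _ t => fun l => l ++ [t])]
    rfl
  have hnd : (ts.foldl (fun d t => d.modify (pvModuleOf t) [] (fun l => l ++ [t])) PySem.Dict.empty).keys.Nodup := by
    rw [hkeys]; exact PySem.Set.nodup_ofList _
  rw [PySem.Dict.items_eq_map_keys _ hnd [], hkeys]
  apply List.map_congr_left
  intro c _
  rw [pvGetD_build]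

theorem pvSorted_items (ts : List (List (String × String))) :
    PySem.List.sorted ((ts.foldl (fun d t => d.modify (pvModuleOf t) [] (fun l => l ++ [t])) PySem.Dict.empty).items) (fun p => p.1) false
      = (PySem.List.sorted (PySem.Set.ofList (ts.map pvModuleOf)) (fun m => m) false).map (fun m => (m, ts.filter (fun t => pvModuleOf t == m))) := by
  rw [pvItems_build]
  apply PySem.List.sorted_eq_of_perm_of_pairwise_lt
  · exact (PySem.List.sorted_perm _ _ false).map _
  · exact (List.pairwise_map).mpr (by simpa using PySem.List.sorted_ofList_pairwise_lt (ts.map pvModuleOf))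

theorem pvInner_fold (ls : List (List (String × String))) (acc : String) :
    ls.foldl (fun prompt tool =>
      prompt ++ "  - `" ++ (PySem.Dict.mk tool).getD "signature" "" ++ "`: " ++ (PySem.Dict.mk tool).getD "description" "" ++ "\n") acc
    = acc ++ (ls.map (fun t => pvLine t ++ "\n")).foldr (· ++ ·) "" := by
  induction ls generalizing acc with
  | nil => simp
  | cons t rest ih =>
      simp only [List.foldl_cons, List.map_cons, List.foldr_cons, ih, pvLine]
      simp [String.append_assoc]

theorem pvJoin_nil (sep : String) : PySem.Str.join sep [] = "" := by
  apply String.ext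
  simp [PySem.Chars.join_nil]

theorem pvJoin_singleton (sep s : String) : PySem.Str.join sep [s] = s := by
  apply String.ext
  simp [PySem.Chars.join_singleton]

theorem pvJoin_cons_cons (sep a b : String) (rest : List String) :
    PySem.Str.join sep (a :: b :: rest) = a ++ sep ++ PySem.Str.join sep (b :: rest) := by
  apply String.ext
  simpa using PySem.Chars.join_cons_cons sep.toList a.toList b.toList (rest.map String.toList)

theorem pvJoin_empty_cons (s : String) (rest : List String) :
    PySem.Str.join "" (s :: rest) = s ++ PySem.Str.join "" rest := by
  cases rest with
  | nil => rw [pvJoin_singleton, pvJoin_nil]; simp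
  | cons r rs =>
      rw [pvJoin_cons_cons]
      simp

theorem pvLines_join (ls : List (List (String × String))) (h : ls ≠ []) :
    (ls.map (fun t => pvLine t ++ "\n")).foldr (· ++ ·) "" ++ "\n" = PySem.Str.join "\n" (ls.map pvLine) ++ "\n\n" := by
  have h2 : ("\n" : String) ++ "\n" = "\n\n" := by decide
  induction ls with
  | nil => exact absurd rfl h
  | cons t rest ih =>
      cases rest with
      | nil =>
          simp only [List.map_cons, List.map_nil, List.foldr_cons, List.foldr_nil, pvJoin_singleton]
          rw [← h2]
          simp [String.append_assoc]
      | cons u us =>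
          have ihr := ih (by simp)
          simp only [List.map_cons, List.foldr_cons] at ihr ⊢
          rw [String.append_assoc, ihr, pvJoin_cons_cons]
          simp [String.append_assoc]

-- one module section, in B's shape
theorem pvSection (ts : List (List (String × String))) (acc m : String)
    (h : ts.filter (fun t => pvModuleOf t == m) ≠ []) :
    ((ts.filter (fun t => pvModuleOf t == m)).foldl (fun prompt tool =>
        prompt ++ "  - `" ++ (PySem.Dict.mk tool).getD "signature" "" ++ "`: " ++ (PySem.Dict.mk tool).getD "description" "" ++ "\n")
      (acc ++ "**" ++ PySem.Str.upper m ++ ":**\n")) ++ "\n"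
    = acc ++ ("**" ++ PySem.Str.upper m ++ ":**\n" ++ PySem.Str.join "\n" ((ts.filter (fun t => pvModuleOf t == m)).map pvLine) ++ "\n\n") := by
  rw [pvInner_fold, String.append_assoc, pvLines_join _ h]
  simp [String.append_assoc]

theorem pvOuter_fold (ts : List (List (String × String))) (M : List String) (acc : String)
    (hne : ∀ m ∈ M, ts.filter (fun t => pvModuleOf t == m) ≠ []) :
    (M.map (fun m => (m, ts.filter (fun t => pvModuleOf t == m)))).foldl (fun prompt mp =>
      (mp.2.foldl (fun prompt tool =>
        prompt ++ "  - `" ++ (PySem.Dict.mk tool).getD "signature" "" ++ "`: " ++ (PySem.Dict.mk tool).getD "description" "" ++ "\n")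
        (prompt ++ "**" ++ PySem.Str.upper mp.1 ++ ":**\n")) ++ "\n") acc
    = acc ++ PySem.Str.join "" (M.map (fun m =>
        "**" ++ PySem.Str.upper m ++ ":**\n" ++ PySem.Str.join "\n" ((ts.filter (fun t => pvModuleOf t == m)).map pvLine) ++ "\n\n")) := by
  induction M generalizing acc with
  | nil => rw [List.map_nil, List.map_nil, List.foldl_nil, pvJoin_nil]; simp
  | cons m rest ih =>
      simp only [List.map_cons, List.foldl_cons]
      rw [pvSection ts acc m (hne m (List.mem_cons_self ..))]
      rw [ih _ (fun x hx => hne x (List.mem_cons_of_mem _ hx)), pvJoin_empty_cons]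
      simp [String.append_assoc]

-- ===== VERDICT (by name: the statement is the Claim_ definition above) =====
theorem get_compact_tools_for_prompt_spec : Claim_equal_get_compact_tools_for_prompt := by
  intro tools language max_tools _hdom
  unfold Spec_get_compact_tools_for_prompt
  unfold get_compact_tools_for_prompt get_compact_tools_for_prompt_alt
  simp only [pvStep_merge]
  rw [pvSorted_items]
  have hne : ∀ m ∈ PySem.List.sorted (PySem.Set.ofList ((pvSliced tools max_tools).map pvModuleOf)) (fun m => m) false,
      (pvSliced tools max_tools).filter (fun t => pvModuleOf t == m) ≠ [] := by
    intro m hm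
    rw [PySem.List.mem_sorted, PySem.Set.mem_ofList] at hm
    obtain ⟨t, ht, rfl⟩ := List.mem_map.mp hm
    intro hcon
    have hmem : t ∈ (pvSliced tools max_tools).filter (fun t' => pvModuleOf t' == pvModuleOf t) :=
      List.mem_filter.mpr ⟨ht, by simp⟩
    rw [hcon] at hmem
    simp at hmem
  rw [pvOuter_fold _ _ _ hne]
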